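-- pv_equiv track=rewrite | github.com/AhFeil/source2RSS | src/web/__init__.py | sort_rss_list
-- ===== SOURCE A (Python) =====
-- from collections import defaultdict
--
-- scraper_class_table_name_prefix = (
--     ("bilibili_up_", "B站UP主动态"),
--     ("youtube_channel_", "Youtube Channel"),
--     ("fanqie_book_", "番茄小说"),
--     ("mangacopy_book_", "拷貝漫畫"),
--     ("zhihu_user_", "知乎用户动态"),
--     ("twitter_user_", "Twitter"),
-- )
--
-- def sort_rss_list(rss_list: list[tuple[str, str]]) -> list[tuple[str, tuple[str, str]]]:
--     sorted_rss = defaultdict(list)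
--     for rss in rss_list:
--         for prefix, group_name in scraper_class_table_name_prefix:
--             if rss[0].startswith(prefix):
--                 sorted_rss[group_name].append(rss)
--                 break
--         else:
--             sorted_rss["singleton"].append(rss)
--
--     for new_rss_list in sorted_rss.values():
--         new_rss_list.sort(key=lambda x: x[1])
--     sorted_rss = sorted(sorted_rss.items())
--     return sorted_rss # type: ignore
-- ===== SOURCE B (Python) =====
-- scraper_class_table_name_prefix = (
--     ("bilibili_up_", "B站UP主动态"),
--     ("youtube_channel_", "Youtube Channel"),
--     ("fanqie_book_", "番茄小说"),
--     ("mangacopy_book_", "拷貝漫畫"),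
--     ("zhihu_user_", "知乎用户动态"),
--     ("twitter_user_", "Twitter"),
-- )
--
-- def _group_of(rss):
--     for prefix, group_name in scraper_class_table_name_prefix:
--         if rss[0].startswith(prefix):
--             return group_name
--     return "singleton"
--
-- def sort_rss_list(rss_list):
--     # No dict at all: the produced group names form a fixed 7-value alphabet, so
--     # collect the distinct names present, sort them, and build each group by a
--     # filter over the input, sorted by x[1].
--     names = sorted({_group_of(rss) for rss in rss_list})
--     return [(name,
--              sorted([rss for rss in rss_list if _group_of(rss) == name],
--                     key=lambda x: x[1]))
--             for name in names]
-- ===== Notes on version B (the rewrite author's own statement) =====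
-- stated objective: alternative
-- what changed: A partitions into a defaultdict and then sorts each bucket; B uses no dict: it collects the set of group names present, sorts them, and builds each group by filtering the input for that name and sorting it, which stays linear per group because the name alphabet is fixed (7 values).
import Mathlib
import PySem

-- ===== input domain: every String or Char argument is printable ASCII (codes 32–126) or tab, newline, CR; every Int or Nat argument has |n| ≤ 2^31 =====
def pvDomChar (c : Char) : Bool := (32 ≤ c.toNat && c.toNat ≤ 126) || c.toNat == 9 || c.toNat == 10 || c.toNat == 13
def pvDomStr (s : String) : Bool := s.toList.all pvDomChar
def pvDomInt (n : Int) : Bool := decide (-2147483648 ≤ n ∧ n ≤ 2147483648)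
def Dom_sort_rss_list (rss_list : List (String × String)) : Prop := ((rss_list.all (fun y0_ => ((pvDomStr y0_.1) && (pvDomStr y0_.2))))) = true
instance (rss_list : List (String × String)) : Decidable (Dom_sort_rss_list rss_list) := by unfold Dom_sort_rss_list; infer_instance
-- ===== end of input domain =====

-- B drops A's defaultdict partition entirely: it sorts the distinct group names present and
-- builds each group by filtering the input (objective: alternative decomposition, same cost).

-- the module-level prefix table
def pvTable : List (String × String) :=
  [("bilibili_up_", "B站UP主动态"),
   ("youtube_channel_", "Youtube Channel"),
   ("fanqie_book_", "番茄小说"),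
   ("mangacopy_book_", "拷貝漫畫"),
   ("zhihu_user_", "知乎用户动态"),
   ("twitter_user_", "Twitter")]

-- A's inner `for prefix, group_name in …: if rss[0].startswith(prefix): … break / else: "singleton"`
-- (also B's `_group_of` helper, which is the same loop returning the group name)
def pvGroupOf : List (String × String) → (String × String) → String
  | [], _ => "singleton"
  | (pre, gname) :: rest, rss =>
      if PySem.Str.startswith rss.1 pre then gname else pvGroupOf rest rss

-- ===== PORT A =====
-- `sorted(sorted_rss.items())` compares (str, list) tuples; dict keys are distinct, so the
-- comparison never reaches the second component: the stable sort by the key is exact there.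
def sort_rss_list (rss_list : List (String × String)) : List (String × (List (String × String))) :=
  let d := rss_list.foldl
    (fun d rss => d.modify (pvGroupOf pvTable rss) [] (fun v => v ++ [rss]))
    PySem.Dict.empty
  let d2 := PySem.Dict.mk (d.items.map (fun p => (p.1, PySem.List.sorted p.2 (fun x => x.2) false)))
  PySem.List.sorted d2.items (fun p => p.1) false

-- ===== PORT B =====
def sort_rss_list_alt (rss_list : List (String × String)) : List (String × (List (String × String))) :=
  let names := PySem.List.sorted
    (PySem.Set.ofList (rss_list.map (fun rss => pvGroupOf pvTable rss))) (fun k => k) false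
  names.map (fun name =>
    (name, PySem.List.sorted (rss_list.filter (fun rss => pvGroupOf pvTable rss == name))
             (fun x => x.2) false))

-- ===== PRECONDITION & SPEC =====
def Spec_sort_rss_list (rss_list : List (String × String)) (out : List (String × (List (String × String)))) : Prop := out = sort_rss_list_alt rss_list
instance (rss_list : List (String × String)) (out : List (String × (List (String × String)))) : Decidable (Spec_sort_rss_list rss_list out) := by unfold Spec_sort_rss_list; infer_instance

-- ===== CLAIM (what is proved, stated in full; the proofs are below) =====
def Claim_equal_sort_rss_list : Prop := ∀ (rss_list : List (String × String)), Dom_sort_rss_list rss_list → Spec_sort_rss_list rss_list (sort_rss_list rss_list)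

-- ===== LEMMAS AND PROOFS =====

-- the grouping fold: keys and per-key contents
lemma keys_groupFold (l : List (String × String)) :
    (l.foldl (fun d rss => d.modify (pvGroupOf pvTable rss) [] (fun v => v ++ [rss]))
      (PySem.Dict.empty : PySem.Dict String (List (String × String)))).keys
      = PySem.Set.ofList (l.map (fun rss => pvGroupOf pvTable rss)) := by
  rw [PySem.Dict.keys_foldl_modify_key l (fun rss => pvGroupOf pvTable rss) [] (fun _ x => fun v => v ++ [x])]
  simp [PySem.Dict.keys_empty, PySem.Set.ofList_eq_foldl, PySem.Set.update]

lemma nodup_keys_groupFold (l : List (String × String)) :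
    (l.foldl (fun d rss => d.modify (pvGroupOf pvTable rss) [] (fun v => v ++ [rss]))
      (PySem.Dict.empty : PySem.Dict String (List (String × String)))).keys.Nodup := by
  exact PySem.Dict.nodup_keys_foldl_modify_key l (fun rss => pvGroupOf pvTable rss) [] (fun _ x => fun v => v ++ [x]) _ (by simp [PySem.Dict.keys_empty])

lemma getD_groupFold (l : List (String × String)) (c : String) :
    (l.foldl (fun d rss => d.modify (pvGroupOf pvTable rss) [] (fun v => v ++ [rss]))
      (PySem.Dict.empty : PySem.Dict String (List (String × String)))).getD c []
      = l.filter (fun x => pvGroupOf pvTable x == c) := by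
  have h : l.foldl (fun d rss => d.modify (pvGroupOf pvTable rss) [] (fun v => v ++ [rss]))
      (PySem.Dict.empty : PySem.Dict String (List (String × String)))
      = (l.map (fun x => (pvGroupOf pvTable x, x))).foldl
          (fun d p => d.modify p.1 [] (fun v => v ++ [p.2])) PySem.Dict.empty := by
    rw [List.foldl_map]
  rw [h, PySem.Dict.getD_foldl_modify_append, List.filter_map]
  simp [Function.comp_def]

-- A's items after the per-group value sort, as a map over the deduplicated group names
lemma itemsA_eq (l : List (String × String)) :
    ((l.foldl (fun d rss => d.modify (pvGroupOf pvTable rss) [] (fun v => v ++ [rss]))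
        (PySem.Dict.empty : PySem.Dict String (List (String × String)))).items.map
        (fun p => (p.1, PySem.List.sorted p.2 (fun x => x.2) false)))
      = (PySem.Set.ofList (l.map (fun rss => pvGroupOf pvTable rss))).map
          (fun k => (k, PySem.List.sorted (l.filter (fun x => pvGroupOf pvTable x == k)) (fun x => x.2) false)) := by
  rw [PySem.Dict.items_eq_map_keys _ (nodup_keys_groupFold l) [], keys_groupFold, List.map_map]
  refine List.map_congr_left ?_
  intro k _
  simp [getD_groupFold]

-- ===== VERDICT (by name: the statement is the Claim_ definition above) =====
theorem sort_rss_list_spec : Claim_equal_sort_rss_list := by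
  intro l _
  unfold Spec_sort_rss_list
  show sort_rss_list l = sort_rss_list_alt l
  simp only [sort_rss_list, sort_rss_list_alt]
  rw [show ∀ (xs : List (String × (List (String × String)))), (PySem.Dict.mk xs).items = xs from fun _ => rfl]
  rw [itemsA_eq]
  set f : String → String × List (String × String) :=
    fun k => (k, PySem.List.sorted (l.filter (fun x => pvGroupOf pvTable x == k)) (fun x => x.2) false) with hf
  set KA := PySem.Set.ofList (l.map (fun rss => pvGroupOf pvTable rss)) with hKA
  have hCpair : ((PySem.List.sorted KA (fun k => k) false).map f).Pairwise (fun a b => a.1 < b.1) :=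
    (PySem.List.sorted_ofList_pairwise_lt (l.map (fun rss => pvGroupOf pvTable rss))).map f (fun a b h => h)
  have hPerm : ((PySem.List.sorted KA (fun k => k) false).map f).Perm (KA.map f) :=
    (PySem.List.sorted_perm KA (fun k => k) false).map f
  rw [PySem.List.sorted_eq_of_perm_of_pairwise_lt (KA.map f) _ (fun p => p.1) hPerm hCpair]
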